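-- pv_equiv track=rewrite | github.com/lmberard/tp3-tda | backtracking-reentrega.py | descartar_ya_matcheados
-- ===== SOURCE A (Python) =====
-- def flat_set(S):
--     r = set()
--     for s in S:
--         for e in s:
--             r.add(e)
--     return r
--
-- def descartar_ya_matcheados(B, C):
--     b_matcheados = set()
--     b_no_matcheados = set()
--
--     for b in B:
--         if len(C.intersection(b)) != 0:
--             b_matcheados.add(b)
--         else:
--             b_no_matcheados.add(b)
--
--     elementos_matcheados = flat_set(b_matcheados)
--     elementos_no_matcheados = flat_set(b_no_matcheados)
--     descartar = elementos_matcheados - elementos_no_matcheados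
--     return descartar
-- ===== SOURCE B (Python) =====
-- def descartar_ya_matcheados(B, C):
--     # Element-centric: for each element keep a sticky flag "every candidate set
--     # containing it matched C"; the answer is the elements whose flag survives.
--     Cs = set(C)
--     ok = {}  # element -> all candidate sets containing it (so far) intersect C
--     for b in B:
--         m = not Cs.isdisjoint(b)
--         for e in b:
--             ok[e] = ok.get(e, True) and m
--     return {e for e, good in ok.items() if good}
-- ===== Notes on version B (the rewrite author's own statement) =====
-- stated objective: alternative
-- what changed: Element-centric algorithm: instead of A's partition of B into matched/unmatched sets-of-candidate-sets, flattening each with flat_set and taking a set difference, B makes one pass keeping a dict with a sticky per-element boolean ('every candidate set containing this element intersected C') and returns the elements whose flag survived; no set of sets, no flatten, no difference.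
import Mathlib
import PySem

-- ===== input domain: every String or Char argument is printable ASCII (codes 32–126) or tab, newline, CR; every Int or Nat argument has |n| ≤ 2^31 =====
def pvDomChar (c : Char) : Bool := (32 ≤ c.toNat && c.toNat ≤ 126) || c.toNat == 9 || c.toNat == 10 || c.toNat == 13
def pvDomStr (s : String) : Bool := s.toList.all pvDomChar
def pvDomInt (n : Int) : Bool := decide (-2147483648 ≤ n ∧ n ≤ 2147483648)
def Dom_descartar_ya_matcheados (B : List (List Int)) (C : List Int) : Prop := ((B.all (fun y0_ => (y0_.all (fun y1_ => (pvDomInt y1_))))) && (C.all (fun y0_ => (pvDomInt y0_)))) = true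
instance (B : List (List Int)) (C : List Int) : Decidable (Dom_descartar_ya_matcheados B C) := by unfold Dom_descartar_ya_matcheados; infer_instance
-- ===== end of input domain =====

-- B replaces A's partition into sets-of-candidate-sets + flatten + set difference by an
-- element-centric pass: one dict with a sticky per-element flag "every candidate set
-- containing it matched C"; the answer is the flagged elements (objective: alternative).


-- ===== PORT A =====
-- flat_set(S): set of all elements of the members of S, in encounter order
def flat_set (S : List (List Int)) : PySem.Set Int :=
  S.foldl (fun r s => s.foldl (fun r e => PySem.Set.add r e) r) PySem.Set.empty

def descartar_ya_matcheados (B : List (List Int)) (C : List Int) : List Int :=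
  let p := B.foldl
    (fun (acc : PySem.Set (List Int) × PySem.Set (List Int)) b =>
      if (PySem.Set.inter C b).length ≠ 0 then (PySem.Set.add acc.1 b, acc.2)
      else (acc.1, PySem.Set.add acc.2 b))
    (PySem.Set.empty, PySem.Set.empty)
  PySem.Set.diff (flat_set p.1) (flat_set p.2)

-- ===== PORT B =====
def descartar_ya_matcheados_alt (B : List (List Int)) (C : List Int) : List Int :=
  let Cs := PySem.Set.ofList C
  let ok := B.foldl
    (fun (ok : PySem.Dict Int Bool) b =>
      let m := !(PySem.Set.isdisjoint Cs b)
      b.foldl (fun ok e => ok.insert e (ok.getD e true && m)) ok)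
    PySem.Dict.empty
  PySem.Set.ofList ((ok.items.filter (fun q => q.2)).map (fun q => q.1))

-- ===== PRECONDITION & SPEC =====
def Spec_descartar_ya_matcheados (B : List (List Int)) (C : List Int) (out : List Int) : Prop := out = descartar_ya_matcheados_alt B C
instance (B : List (List Int)) (C : List Int) (out : List Int) : Decidable (Spec_descartar_ya_matcheados B C out) := by unfold Spec_descartar_ya_matcheados; infer_instance

-- ===== CLAIM (what is proved, stated in full; the proofs are below) =====
def Claim_equal_descartar_ya_matcheados : Prop := ∀ (B : List (List Int)) (C : List Int), Dom_descartar_ya_matcheados B C → Spec_descartar_ya_matcheados B C (descartar_ya_matcheados B C)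

-- ===== LEMMAS AND PROOFS =====

-- the row test A uses, as a Prop on the row
abbrev pvCond (C b : List Int) : Prop := (PySem.Set.inter C b).length ≠ 0
-- the row test B uses, a Bool
def pvMb (C b : List Int) : Bool := !(PySem.Set.isdisjoint (PySem.Set.ofList C) b)
-- element sets of the matched rows, the unmatched rows, and all rows
def pvM (B : List (List Int)) (C : List Int) : PySem.Set Int :=
  B.foldl (fun s b => if pvCond C b then PySem.Set.update s b else s) []
def pvU (B : List (List Int)) (C : List Int) : PySem.Set Int :=
  B.foldl (fun s b => if pvCond C b then s else PySem.Set.update s b) []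
def pvK (B : List (List Int)) : PySem.Set Int :=
  B.foldl (fun s b => PySem.Set.update s b) []
-- B's per-element flag, read off the whole input
def pvGood (B : List (List Int)) (C : List Int) (x : Int) : Bool :=
  B.all (fun b => !(decide (x ∈ b)) || pvMb C b)

-- membership in flat_set's accumulator form
theorem mem_flatAcc (S : List (List Int)) (r : PySem.Set Int) (e : Int) :
    e ∈ S.foldl (fun r s => s.foldl (fun r e => PySem.Set.add r e) r) r ↔
      e ∈ r ∨ ∃ s ∈ S, e ∈ s := by
  induction S generalizing r with
  | nil => simp
  | cons s S ih =>
    simp only [List.foldl_cons, ih, List.mem_cons]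
    have : e ∈ s.foldl (fun r e => PySem.Set.add r e) r ↔ e ∈ r ∨ e ∈ s := by
      rw [← PySem.Set.update_map_eq_foldl_add (f := fun x => x)]
      simp [PySem.Set.mem_update]
    rw [this]
    constructor
    · rintro ((h | h) | ⟨t, ht, he⟩)
      · exact Or.inl h
      · exact Or.inr ⟨s, Or.inl rfl, h⟩
      · exact Or.inr ⟨t, Or.inr ht, he⟩
    · rintro (h | ⟨t, (rfl | ht), he⟩)
      · exact Or.inl (Or.inl h)
      · exact Or.inl (Or.inr he)
      · exact Or.inr ⟨t, ht, he⟩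

theorem mem_flat_set (S : List (List Int)) (e : Int) :
    e ∈ flat_set S ↔ ∃ s ∈ S, e ∈ s := by
  unfold flat_set
  rw [mem_flatAcc]
  simp [PySem.Set.empty]

-- update by a member list of S does not change flat_set S
theorem update_flat_of_mem (S : List (List Int)) (b : List Int) (hb : b ∈ S) :
    PySem.Set.update (flat_set S) b = flat_set S := by
  rw [PySem.Set.update_eq_append_filter]
  have : (PySem.Set.ofList b).filter (fun y => !(PySem.Set.contains (flat_set S) y)) = [] := by
    apply List.filter_eq_nil_iff.mpr
    intro y hy
    have hyb : y ∈ b := (PySem.Set.mem_ofList b y).mp hy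
    have : y ∈ flat_set S := (mem_flat_set S y).mpr ⟨b, hb, hyb⟩
    simpa using this
  rw [this, List.append_nil]

-- flat_set of (add S b) = update (flat_set S) b
theorem flat_set_add (S : List (List Int)) (b : List Int) :
    flat_set (PySem.Set.add S b) = PySem.Set.update (flat_set S) b := by
  by_cases hb : b ∈ S
  · rw [PySem.Set.add_of_mem hb, update_flat_of_mem S b hb]
  · rw [PySem.Set.add_of_not_mem hb]
    unfold flat_set
    rw [List.foldl_append]
    simp only [List.foldl_cons, List.foldl_nil]
    rw [← PySem.Set.update_map_eq_foldl_add (f := fun x => x)]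
    simp

-- A's pair fold, split into its two components
theorem pair_fold (B : List (List Int)) (C : List Int)
    (S1 S2 : PySem.Set (List Int)) :
    B.foldl
      (fun (acc : PySem.Set (List Int) × PySem.Set (List Int)) b =>
        if (PySem.Set.inter C b).length ≠ 0 then (PySem.Set.add acc.1 b, acc.2)
        else (acc.1, PySem.Set.add acc.2 b)) (S1, S2) =
    (B.foldl (fun S b => if pvCond C b then PySem.Set.add S b else S) S1,
     B.foldl (fun S b => if pvCond C b then S else PySem.Set.add S b) S2) := by
  induction B generalizing S1 S2 with
  | nil => rfl
  | cons b B ih =>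
    simp only [List.foldl_cons]
    by_cases h : (PySem.Set.inter C b).length ≠ 0
    · rw [if_pos h, if_pos (show pvCond C b from h), if_pos (show pvCond C b from h), ih]
    · rw [if_neg h, if_neg (show ¬ pvCond C b from h), if_neg (show ¬ pvCond C b from h), ih]

-- flat_set through a conditional add-fold is the conditional element-update fold
theorem flat_fold_if (c : List Int → Prop) [DecidablePred c] (B : List (List Int))
    (S0 : PySem.Set (List Int)) :
    flat_set (B.foldl (fun S b => if c b then PySem.Set.add S b else S) S0) =
      B.foldl (fun s b => if c b then PySem.Set.update s b else s) (flat_set S0) := by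
  induction B generalizing S0 with
  | nil => rfl
  | cons b B ih =>
    simp only [List.foldl_cons]
    by_cases h : c b
    · rw [if_pos h, if_pos h, ih, flat_set_add]
    · rw [if_neg h, if_neg h, ih]

theorem flat_fold_if_not (c : List Int → Prop) [DecidablePred c] (B : List (List Int))
    (S0 : PySem.Set (List Int)) :
    flat_set (B.foldl (fun S b => if c b then S else PySem.Set.add S b) S0) =
      B.foldl (fun s b => if c b then s else PySem.Set.update s b) (flat_set S0) := by
  induction B generalizing S0 with
  | nil => rfl
  | cons b B ih =>
    simp only [List.foldl_cons]
    by_cases h : c b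
    · rw [if_pos h, if_pos h, ih]
    · rw [if_neg h, if_neg h, ih, flat_set_add]

-- A's result, in terms of the element sets of the matched / unmatched rows
theorem A_eq (B : List (List Int)) (C : List Int) :
    descartar_ya_matcheados B C = PySem.Set.diff (pvM B C) (pvU B C) := by
  unfold descartar_ya_matcheados
  have hp := pair_fold B C PySem.Set.empty PySem.Set.empty
  simp only [hp, flat_fold_if (pvCond C), flat_fold_if_not (pvCond C)]
  rfl

-- B's inner loop: lookup after a whole row was processed with flag m
theorem innerVal (b : List Int) (d : PySem.Dict Int Bool) (m : Bool) (x : Int) :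
    (b.foldl (fun d e => d.insert e (d.getD e true && m)) d).getD x true =
      if x ∈ b then d.getD x true && m else d.getD x true := by
  induction b generalizing d with
  | nil => simp
  | cons e b ih =>
    simp only [List.foldl_cons, ih, PySem.Dict.getD_insert, List.mem_cons]
    by_cases hx : x ∈ b
    · rw [if_pos hx, if_pos (Or.inr hx)]
      by_cases he : x = e
      · rw [if_pos he, he, Bool.and_assoc, Bool.and_self]
      · rw [if_neg he]
    · rw [if_neg hx]
      by_cases he : x = e
      · rw [if_pos he, if_pos (Or.inl he), he]
      · rw [if_neg he, if_neg (by tauto)]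

-- B's outer loop: every element's flag is the conjunction over the rows containing it
theorem outerVal (B : List (List Int)) (C : List Int) (d : PySem.Dict Int Bool) (x : Int) :
    (B.foldl
      (fun (ok : PySem.Dict Int Bool) b =>
        b.foldl (fun ok e =>
          ok.insert e (ok.getD e true && !(PySem.Set.isdisjoint (PySem.Set.ofList C) b))) ok)
      d).getD x true =
      (d.getD x true && pvGood B C x) := by
  induction B generalizing d with
  | nil => simp [pvGood]
  | cons b B ih =>
    simp only [List.foldl_cons]
    rw [ih, innerVal]
    unfold pvGood pvMb
    simp only [List.all_cons]
    by_cases hx : x ∈ b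
    · rw [if_pos hx]
      simp [hx, Bool.and_assoc]
    · rw [if_neg hx]
      simp [hx]

-- B's outer loop: the keys are the element set of all rows
theorem keysVal (B : List (List Int)) (C : List Int) (d : PySem.Dict Int Bool) :
    (B.foldl
      (fun (ok : PySem.Dict Int Bool) b =>
        b.foldl (fun ok e =>
          ok.insert e (ok.getD e true && !(PySem.Set.isdisjoint (PySem.Set.ofList C) b))) ok)
      d).keys =
      B.foldl (fun s b => PySem.Set.update s b) d.keys := by
  induction B generalizing d with
  | nil => rfl
  | cons b B ih =>
    simp only [List.foldl_cons]
    rw [ih, PySem.Dict.keys_foldl_insert (f := fun (d : PySem.Dict Int Bool) e =>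
        d.getD e true && !(PySem.Set.isdisjoint (PySem.Set.ofList C) b))]

theorem nodupKeys (B : List (List Int)) (C : List Int) (d : PySem.Dict Int Bool)
    (h : d.keys.Nodup) :
    (B.foldl
      (fun (ok : PySem.Dict Int Bool) b =>
        b.foldl (fun ok e =>
          ok.insert e (ok.getD e true && !(PySem.Set.isdisjoint (PySem.Set.ofList C) b))) ok)
      d).keys.Nodup := by
  induction B generalizing d with
  | nil => exact h
  | cons b B ih =>
    exact ih _ (PySem.Dict.nodup_keys_foldl_insert b _ d h)

-- B's result, in terms of the element set of all rows and the per-element flag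
theorem B_eq (B : List (List Int)) (C : List Int) :
    descartar_ya_matcheados_alt B C = (pvK B).filter (fun x => pvGood B C x) := by
  show PySem.Set.ofList
    ((((B.foldl
        (fun (ok : PySem.Dict Int Bool) b =>
          b.foldl (fun ok e =>
            ok.insert e (ok.getD e true && !(PySem.Set.isdisjoint (PySem.Set.ofList C) b))) ok)
        PySem.Dict.empty)).items.filter (fun q => q.2)).map (fun q => q.1)) = _
  set ok := B.foldl
    (fun (ok : PySem.Dict Int Bool) b =>
      b.foldl (fun ok e =>
        ok.insert e (ok.getD e true && !(PySem.Set.isdisjoint (PySem.Set.ofList C) b))) ok)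
    PySem.Dict.empty with hok
  have hnd : ok.keys.Nodup := by
    rw [hok]; exact nodupKeys B C _ (by simp)
  have hkeys : ok.keys = pvK B := by
    rw [hok, keysVal]; rfl
  have hval : ∀ x, ok.getD x true = pvGood B C x := by
    intro x; rw [hok, outerVal]; simp [PySem.Dict.getD_empty]
  rw [PySem.Dict.items_eq_map_keys ok hnd true]
  rw [List.filter_map, List.map_map]
  have : (List.filter ((fun q => q.2) ∘ fun k => (k, ok.getD k true)) ok.keys)
      = ok.keys.filter (fun x => pvGood B C x) := by
    apply List.filter_congr
    intro x _
    simp [hval x]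
  rw [this, hkeys]
  have hndf : ((pvK B).filter (fun x => pvGood B C x)).Nodup := by
    apply List.Nodup.filter
    rw [← hkeys]; exact hnd
  have hmap : List.map ((fun (q : Int × Bool) => q.1) ∘ fun k => (k, ok.getD k true))
      ((pvK B).filter (fun x => pvGood B C x)) = (pvK B).filter (fun x => pvGood B C x) := by
    simp only [Function.comp_def]
    exact List.map_id' _
  rw [hmap]
  exact PySem.Set.ofList_eq_self_of_nodup _ hndf

-- membership in pvU
theorem mem_foldU (B : List (List Int)) (C : List Int) (s : PySem.Set Int) (x : Int) :
    x ∈ B.foldl (fun s b => if pvCond C b then s else PySem.Set.update s b) s ↔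
      x ∈ s ∨ ∃ b ∈ B, ¬ pvCond C b ∧ x ∈ b := by
  induction B generalizing s with
  | nil => simp
  | cons b B ih =>
    simp only [List.foldl_cons, ih, List.mem_cons]
    by_cases h : pvCond C b
    · rw [if_pos h]
      constructor
      · rintro (hs | ⟨t, ht, hc, hx⟩)
        · exact Or.inl hs
        · exact Or.inr ⟨t, Or.inr ht, hc, hx⟩
      · rintro (hs | ⟨t, (rfl | ht), hc, hx⟩)
        · exact Or.inl hs
        · exact absurd h hc
        · exact Or.inr ⟨t, ht, hc, hx⟩
    · rw [if_neg h]
      simp only [PySem.Set.mem_update]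
      constructor
      · rintro ((hs | hb) | ⟨t, ht, hc, hx⟩)
        · exact Or.inl hs
        · exact Or.inr ⟨b, Or.inl rfl, h, hb⟩
        · exact Or.inr ⟨t, Or.inr ht, hc, hx⟩
      · rintro (hs | ⟨t, (rfl | ht), hc, hx⟩)
        · exact Or.inl (Or.inl hs)
        · exact Or.inl (Or.inr hx)
        · exact Or.inr ⟨t, ht, hc, hx⟩

theorem mem_pvU (B : List (List Int)) (C : List Int) (x : Int) :
    x ∈ pvU B C ↔ ∃ b ∈ B, ¬ pvCond C b ∧ x ∈ b := by
  unfold pvU; rw [mem_foldU]; simp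

-- the two row tests agree
theorem mb_iff (C b : List Int) : pvMb C b = true ↔ pvCond C b := by
  unfold pvMb pvCond
  rw [Bool.not_eq_eq_eq_not, Bool.not_true, ← Bool.not_eq_true, PySem.Set.isdisjoint_iff]
  simp only [ne_eq, List.length_eq_zero_iff]
  constructor
  · intro h hnil
    apply h
    intro y hyC hyb
    have hyC' : y ∈ C := (PySem.Set.mem_ofList C y).mp hyC
    have : y ∈ PySem.Set.inter C b := (PySem.Set.mem_inter C b y).mpr ⟨hyC', hyb⟩
    rw [hnil] at this
    exact absurd this (List.not_mem_nil)
  · intro h hall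
    apply h
    apply List.eq_nil_iff_forall_not_mem.mpr
    intro y hy
    have := (PySem.Set.mem_inter C b y).mp hy
    exact hall y ((PySem.Set.mem_ofList C y).mpr this.1) this.2

-- B's flag is exactly "not an element of any unmatched row"
theorem good_eq (B : List (List Int)) (C : List Int) (x : Int) :
    pvGood B C x = !(decide (x ∈ pvU B C)) := by
  rw [Bool.eq_iff_iff]
  unfold pvGood
  simp only [List.all_eq_true, Bool.or_eq_true, Bool.not_eq_true', decide_eq_false_iff_not, mem_pvU]
  constructor
  · intro h ⟨b, hb, hc, hx⟩
    rcases h b hb with h' | h'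
    · exact h' hx
    · exact hc ((mb_iff C b).mp h')
  · intro h b hb
    by_cases hx : x ∈ b
    · right
      by_contra hm
      exact h ⟨b, hb, fun hc => hm ((mb_iff C b).mpr hc), hx⟩
    · left; exact hx

-- the core order lemma: filtering by a predicate that kills every unmatched row's
-- elements, the matched-rows element set and the all-rows element set coincide
theorem filter_M_K (C : List Int) (q : Int → Bool) :
    ∀ (B : List (List Int)) (s k : PySem.Set Int),
      (∀ x, q x = true → (x ∈ s ↔ x ∈ k)) →
      s.filter q = k.filter q →
      (∀ b ∈ B, ¬ pvCond C b → ∀ x ∈ b, q x = false) →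
      (B.foldl (fun s b => if pvCond C b then PySem.Set.update s b else s) s).filter q =
        (B.foldl (fun s b => PySem.Set.update s b) k).filter q := by
  intro B
  induction B with
  | nil => intro s k _ hf _; simpa using hf
  | cons b B ih =>
    intro s k hsk hf hB
    simp only [List.foldl_cons]
    by_cases h : pvCond C b
    · rw [if_pos h]
      apply ih
      · intro x hq
        simp only [PySem.Set.mem_update, hsk x hq]
      · rw [PySem.Set.update_eq_append_filter, PySem.Set.update_eq_append_filter,
          List.filter_append, List.filter_append, hf]
        congr 1
        rw [List.filter_filter, List.filter_filter]
        apply List.filter_congr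
        intro y hy
        by_cases hq : q y = true
        · have := hsk y hq
          by_cases hys : y ∈ s
          · simp [hys, this.mp hys]
          · have hyk : ¬ y ∈ k := fun hk => hys (this.mpr hk)
            simp [hys, hyk]
        · rw [Bool.not_eq_true] at hq
          simp [hq]
      · intro b' hb' hc x hx
        exact hB b' (List.mem_cons_of_mem b hb') hc x hx
    · rw [if_neg h]
      apply ih
      · intro x hq
        rw [hsk x hq]
        simp only [PySem.Set.mem_update]
        constructor
        · exact Or.inl
        · rintro (hk | hb)
          · exact hk
          · exact absurd (hB b (List.mem_cons_self) h x hb) (by simp [hq])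
      · rw [PySem.Set.update_eq_append_filter, List.filter_append, hf]
        have : ((PySem.Set.ofList b).filter (fun y => !(PySem.Set.contains k y))).filter q = [] := by
          apply List.filter_eq_nil_iff.mpr
          intro y hy
          have hyb : y ∈ b := (PySem.Set.mem_ofList b y).mp (List.mem_of_mem_filter hy)
          simp [hB b (List.mem_cons_self) h y hyb]
        rw [this, List.append_nil]
      · intro b' hb' hc x hx
        exact hB b' (List.mem_cons_of_mem b hb') hc x hx

-- ===== VERDICT (by name: the statement is the Claim_ definition above) =====
theorem descartar_ya_matcheados_spec : Claim_equal_descartar_ya_matcheados := by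
  intro B C _
  unfold Spec_descartar_ya_matcheados
  rw [A_eq, B_eq]
  show ((pvM B C).filter fun y => !(PySem.Set.contains (pvU B C) y)) = _
  have hq : ∀ x, (!(PySem.Set.contains (pvU B C) x)) = pvGood B C x := by
    intro x
    rw [good_eq]
    congr 1
    rw [Bool.eq_iff_iff, PySem.Set.contains_iff, decide_eq_true_iff]
  calc ((pvM B C).filter fun y => !(PySem.Set.contains (pvU B C) y))
      = (pvM B C).filter (fun x => pvGood B C x) := by
        apply List.filter_congr; intro x _; exact hq x
    _ = (pvK B).filter (fun x => pvGood B C x) := by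
        unfold pvM pvK
        apply filter_M_K C (fun x => pvGood B C x) B [] []
        · intro x _; rfl
        · rfl
        · intro b hb hc x hx
          rw [good_eq, Bool.not_eq_eq_eq_not, Bool.not_false, decide_eq_true_iff, mem_pvU]
          exact ⟨b, hb, hc, hx⟩
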